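-- pv_equiv track=rewrite | github.com/sv6-UCC/Web_Development_Project | practice (1).py | loop_the_loop_while
-- ===== SOURCE A (Python) =====
-- def loop_the_loop_while(a1, a2):
--    """ new_loop = []
--
--     for e1 in a1:
--         for e2 in a2:
--             new_loop.append(e1 + e2)
--     return new_loop"""
--    new_loop =[]
--    i =0
--    while i < len(a1):
--        j =0
--        while j < len(a2):
--            if a1[i] == a2[j]:
--                new_loop.append(a1[i]+a2[j])
--            j+=1
--        i+=1
--    return new_loop
-- ===== SOURCE B (Python) =====
-- def loop_the_loop_while(a1, a2):
--     cnt = {}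
--     for x in a2:
--         cnt[x] = cnt.get(x, 0) + 1
--     out = []
--     for e1 in a1:
--         out.extend([e1 + e1] * cnt.get(e1, 0))
--     return out
-- ===== Notes on version B (the rewrite author's own statement) =====
-- stated objective: faster
-- what changed: Replaces the nested equality scan of a2 for every element of a1 by a histogram of a2 built once; each e1 then contributes count(e1) copies of 2*e1 directly.
import Mathlib
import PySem

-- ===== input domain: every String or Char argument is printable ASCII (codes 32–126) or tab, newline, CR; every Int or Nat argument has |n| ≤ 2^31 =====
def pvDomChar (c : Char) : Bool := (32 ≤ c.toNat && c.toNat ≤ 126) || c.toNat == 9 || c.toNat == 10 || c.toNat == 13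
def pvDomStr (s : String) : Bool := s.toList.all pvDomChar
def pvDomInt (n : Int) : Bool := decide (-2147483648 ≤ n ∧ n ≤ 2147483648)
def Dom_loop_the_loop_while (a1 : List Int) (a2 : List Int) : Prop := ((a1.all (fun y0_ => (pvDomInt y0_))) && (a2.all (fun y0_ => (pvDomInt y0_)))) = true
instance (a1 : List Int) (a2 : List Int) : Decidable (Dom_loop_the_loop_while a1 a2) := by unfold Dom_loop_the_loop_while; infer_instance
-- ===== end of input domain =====

-- B removes A's nested scan: a histogram of a2 is built once, each e1 appends count(e1) copies of 2*e1 (asymptotically faster).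
-- ===== PORT A =====
-- A walks i over a1's indices and, for each, j over a2's indices, appending a1[i]+a2[j] when equal;
-- since the while loops visit every index in order, this is the fold over the lists themselves (indices always in range, so a1[i]/a2[j] never raise).
def loop_the_loop_while (a1 : List Int) (a2 : List Int) : List Int :=
  a1.foldl (fun acc x =>
    a2.foldl (fun acc2 y => if x = y then acc2 ++ [x + y] else acc2) acc) []

-- ===== PORT B =====
def loop_the_loop_while_alt (a1 : List Int) (a2 : List Int) : List Int :=
  let cnt : PySem.Dict Int Int := a2.foldl (fun d x => d.insert x (d.getD x 0 + 1)) PySem.Dict.empty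
  a1.foldl (fun out e1 => out ++ List.replicate (cnt.getD e1 0).toNat (e1 + e1)) []

-- ===== PRECONDITION & SPEC =====
def Spec_loop_the_loop_while (a1 : List Int) (a2 : List Int) (out : List Int) : Prop := out = loop_the_loop_while_alt a1 a2
instance (a1 : List Int) (a2 : List Int) (out : List Int) : Decidable (Spec_loop_the_loop_while a1 a2 out) := by unfold Spec_loop_the_loop_while; infer_instance

-- ===== CLAIM (what is proved, stated in full; the proofs are below) =====
def Claim_equal_loop_the_loop_while : Prop := ∀ (a1 : List Int) (a2 : List Int), Dom_loop_the_loop_while a1 a2 → Spec_loop_the_loop_while a1 a2 (loop_the_loop_while a1 a2)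

-- ===== LEMMAS AND PROOFS =====
-- A's inner loop over a2 with x fixed appends exactly (a2.count x) copies of x + x.
theorem inner_loop_eq (x : Int) (a2 : List Int) (acc : List Int) :
    a2.foldl (fun acc2 y => if x = y then acc2 ++ [x + y] else acc2) acc
      = acc ++ List.replicate (a2.count x) (x + x) := by
  induction a2 generalizing acc with
  | nil => simp
  | cons y ys ih =>
    by_cases h : x = y
    · subst h
      simp only [List.foldl, ih, if_pos, List.count_cons_self]
      simp [List.replicate_succ, List.append_assoc]
    · have h' : ¬ (y = x) := fun e => h e.symm
      simp [List.foldl, h, ih, h']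

theorem cnt_getD (a2 : List Int) (v : Int) :
    (a2.foldl (fun d x => d.insert x (d.getD x 0 + 1)) (PySem.Dict.empty : PySem.Dict Int Int)).getD v 0
      = (a2.count v : Int) := by
  rw [PySem.Dict.getD_foldl_insert_add_one]
  simp [PySem.Dict.empty, PySem.Dict.getD, PySem.Dict.get?]

-- ===== VERDICT (by name: the statement is the Claim_ definition above) =====
theorem loop_the_loop_while_spec : Claim_equal_loop_the_loop_while := by
  intro a1 a2 hd
  clear hd
  unfold Spec_loop_the_loop_while loop_the_loop_while loop_the_loop_while_alt
  simp only
  induction a1 using List.reverseRecOn with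
  | nil => simp
  | append_singleton xs x ih =>
    rw [List.foldl_append, List.foldl_append, ih,
        List.foldl_cons, List.foldl_nil, List.foldl_cons, List.foldl_nil,
        inner_loop_eq, cnt_getD]
    simp
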